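-- pv_equiv track=rewrite | github.com/shrinathasati/Leetcode-practice | 4feb_ques2.py | minimumTimeToRevert
-- ===== SOURCE A (Python) =====
-- def minimumTimeToRevert(word, k):
--     n = len(word)
--
--     for i in range(1, k + 1):
--         prefix = word[:i]
--         suffix = word[i:]
--
--         # Check if the remaining suffix is a rotation of the original string
--         if suffix + prefix == word:
--             return (n + i - 1) // i  # Fix: Return the correct remaining time
--
--     # If no rotation is found for all lengths, return -1
--     return (n + k - 1) // k  # Fix: Return the correct remaining time when no rotation is found
-- ===== SOURCE B (Python) =====
-- def minimumTimeToRevert(word, k):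
--     # The smallest i>=1 with word[i:]+word[:i] == word is the smallest index >= 1
--     # at which word occurs in word+word (always <= len(word)); one substring
--     # search replaces the loop of O(n) slice comparisons.
--     n = len(word)
--     p = 1 if n == 0 else (word + word).find(word, 1)
--     if p <= k:
--         return (n + p - 1) // p
--     return (n + k - 1) // k
-- ===== Notes on version B (the rewrite author's own statement) =====
-- stated objective: faster
-- what changed: B replaces A's loop of up to k rotation checks (each building and comparing O(n) slices) by a single substring search: the smallest i>=1 with word[i:]+word[:i]==word is the first occurrence of word in word+word starting at index 1, then the answer is computed by one closed-form branch on whether that period is <= k.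
import Mathlib
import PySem

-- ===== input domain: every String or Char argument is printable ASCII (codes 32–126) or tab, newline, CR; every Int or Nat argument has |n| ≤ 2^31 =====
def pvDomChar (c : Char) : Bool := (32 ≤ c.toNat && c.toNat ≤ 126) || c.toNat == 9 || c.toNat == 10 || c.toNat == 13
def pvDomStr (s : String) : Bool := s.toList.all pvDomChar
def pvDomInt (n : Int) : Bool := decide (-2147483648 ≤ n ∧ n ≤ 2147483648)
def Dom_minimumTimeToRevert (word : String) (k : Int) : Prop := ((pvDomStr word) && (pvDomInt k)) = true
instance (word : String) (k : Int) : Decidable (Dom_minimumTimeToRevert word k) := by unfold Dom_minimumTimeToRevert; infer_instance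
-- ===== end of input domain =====

-- B replaces A's loop of rotation checks by one substring search in word+word; measured asymptotically faster.

-- ===== PORT A =====
-- the 'for i in range(1, k+1): …' loop of A, with early return on a matching rotation
def pvALoop (w : List Char) (k : Int) (i : Int) : Int :=
  if h : i ≤ k then
    let pre := PySem.List.slice w none (some i)
    let suf := PySem.List.slice w (some i) none
    if suf ++ pre = w then PySem.Int.floordiv ((w.length : Int) + i - 1) i
    else pvALoop w k (i + 1)
  else PySem.Int.floordiv ((w.length : Int) + k - 1) k
termination_by (k + 1 - i).toNat
decreasing_by omega

def minimumTimeToRevert (word : String) (k : Int) : Int :=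
  pvALoop word.toList k 1

-- ===== PORT B =====
def minimumTimeToRevert_alt (word : String) (k : Int) : Int :=
  let w := word.toList
  let n : Int := (w.length : Int)
  let p : Int := if n = 0 then 1 else PySem.Chars.findFrom (w ++ w) w 1 none
  if p ≤ k then PySem.Int.floordiv (n + p - 1) p
  else PySem.Int.floordiv (n + k - 1) k

-- ===== PRECONDITION & SPEC =====
-- Pre_ excludes exactly k = 0, where Python A (and B) raises ZeroDivisionError in '(n+k-1)//k'.
def Pre_minimumTimeToRevert (word : String) (k : Int) : Prop := k ≠ 0
instance (word : String) (k : Int) : Decidable (Pre_minimumTimeToRevert word k) := by unfold Pre_minimumTimeToRevert; infer_instance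
def pvWitness_minimumTimeToRevert : String × Int := ("aba", 2)

def Spec_minimumTimeToRevert (word : String) (k : Int) (out : Int) : Prop := out = minimumTimeToRevert_alt word k
instance (word : String) (k : Int) (out : Int) : Decidable (Spec_minimumTimeToRevert word k out) := by unfold Spec_minimumTimeToRevert; infer_instance

-- ===== CLAIM (what is proved, stated in full; the proofs are below) =====
def Claim_equal_minimumTimeToRevert : Prop := ∀ (word : String) (k : Int), Dom_minimumTimeToRevert word k → Pre_minimumTimeToRevert word k → Spec_minimumTimeToRevert word k (minimumTimeToRevert word k)

-- ===== LEMMAS AND PROOFS =====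

-- the rotation test A performs at index i, as a Bool
def pvCondA (w : List Char) (i : Int) : Bool :=
  decide (PySem.List.slice w (some i) none ++ PySem.List.slice w none (some i) = w)

theorem pvALoop_eq_find? (w : List Char) (k i : Int) :
    pvALoop w k i =
      match (PySem.List.pyRange i (k + 1) 1).find? (pvCondA w) with
      | some j => PySem.Int.floordiv ((w.length : Int) + j - 1) j
      | none => PySem.Int.floordiv ((w.length : Int) + k - 1) k := by
  generalize hm : (k + 1 - i).toNat = m
  induction m generalizing i with
  | zero =>
    rw [pvALoop, dif_neg (by omega : ¬ i ≤ k), PySem.List.pyRange_one_eq_nil (by omega)]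
    rfl
  | succ m ih =>
    rw [pvALoop, dif_pos (by omega : i ≤ k),
      PySem.List.pyRange_one_cons (by omega : i < k + 1), List.find?]
    by_cases h : PySem.List.slice w (some i) none ++ PySem.List.slice w none (some i) = w
    · simp [pvCondA, h]
    · simp only [pvCondA, h, decide_false]
      rw [← ih (i + 1) (by omega)]
      simp

theorem pv_find?_pyRange_some (f : Int → Bool) (a b m : Int) (h1 : a ≤ m) (h2 : m < b)
    (hm : f m = true) (hmin : ∀ j, a ≤ j → j < m → f j = false) :
    (PySem.List.pyRange a b 1).find? f = some m := by
  rw [PySem.List.pyRange_one_append a m b h1 (by omega), List.find?_append]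
  have h0 : (PySem.List.pyRange a m 1).find? f = none := by
    rw [List.find?_eq_none]
    intro x hx
    rw [PySem.List.mem_pyRange_one] at hx
    simp [hmin x hx.1 hx.2]
  rw [h0, PySem.List.pyRange_one_cons (by omega : m < b)]
  simp [List.find?, hm]

theorem pv_find?_pyRange_none (f : Int → Bool) (a b : Int)
    (h : ∀ j, a ≤ j → j < b → f j = false) :
    (PySem.List.pyRange a b 1).find? f = none := by
  rw [List.find?_eq_none]
  intro x hx
  rw [PySem.List.mem_pyRange_one] at hx
  simp [h x hx.1 hx.2]

-- A's rotation test at 1 ≤ m ≤ |w| is 'w occurs at offset m in w ++ w'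
theorem pvCondA_iff (w : List Char) (m : Nat) (_h1 : 1 ≤ m) (h2 : m ≤ w.length) :
    pvCondA w (m : Int) = true ↔ w <+: (w ++ w).drop m := by
  have hdrop : (w ++ w).drop m = w.drop m ++ w := by
    rw [List.drop_append]
    simp [Nat.sub_eq_zero_of_le h2]
  have htake : (w.drop m ++ w).take w.length = w.drop m ++ w.take m := by
    rw [List.take_append, List.take_of_length_le (by simp), List.length_drop,
      Nat.sub_sub_self h2]
  rw [pvCondA, decide_eq_true_eq, PySem.List.slice_from_natCast, PySem.List.slice_to_natCast,
    hdrop, List.prefix_iff_eq_take, htake]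
  exact eq_comm

-- ===== VERDICT (by name: the statement is the Claim_ definition above) =====
theorem minimumTimeToRevert_spec : Claim_equal_minimumTimeToRevert := by
  intro word k _ hk
  unfold Spec_minimumTimeToRevert minimumTimeToRevert minimumTimeToRevert_alt
  rw [pvALoop_eq_find?]
  set w := word.toList with hw
  by_cases hn : w.length = 0
  · -- empty word: the rotation test holds already at i = 1
    have hwnil : w = [] := List.length_eq_zero_iff.mp hn
    by_cases hk1 : 1 ≤ k
    · rw [pv_find?_pyRange_some (pvCondA w) 1 (k + 1) 1 le_rfl (by omega)
        (by simp [hwnil, pvCondA, PySem.List.slice]) (by intro j hj1 hj2; omega)]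
      simp [hn, hk1]
    · rw [pv_find?_pyRange_none (pvCondA w) 1 (k + 1) (by intro j hj1 hj2; omega)]
      simp [hn, show ¬ (1 : Int) ≤ k from hk1]
  · -- non-empty word: the first occurrence of w in w ++ w at offset ≥ 1
    have hn1 : 1 ≤ w.length := Nat.one_le_iff_ne_zero.mpr hn
    have hlen2 : (1 : Nat) ≤ (w ++ w).length := by simp; omega
    set P : Int := PySem.Chars.findFrom (w ++ w) w 1 none with hP
    have hiff := PySem.Chars.findFrom_natCast_eq_neg_one_iff (w ++ w) w 1 hlen2
    rw [Nat.cast_one] at hiff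
    have hne : P ≠ -1 := by
      rw [hP]
      intro hcon
      have hsuf : w <:+ (w ++ w).drop 1 := by
        rw [List.drop_append, Nat.sub_eq_zero_of_le hn1]
        exact ⟨w.drop 1, rfl⟩
      exact (hiff.mp hcon) hsuf.isInfix
    have hne' : PySem.Chars.findFrom (w ++ w) w ((1 : Nat) : Int) none ≠ -1 := by
      rw [Nat.cast_one, ← hP]; exact hne
    obtain ⟨hP1, hPpre, hPmin⟩ := PySem.Chars.findFrom_natCast_spec (w ++ w) w 1 hlen2 hne'
    rw [Nat.cast_one, ← hP] at hP1 hPpre hPmin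
    have hP1' : (1 : Int) ≤ P := by exact_mod_cast hP1
    have hPn : P.toNat ≤ w.length := by
      have := hPpre.length_le
      simp [List.length_drop] at this
      omega
    have hPcast : ((P.toNat : Nat) : Int) = P := Int.toNat_of_nonneg (by omega)
    by_cases hpk : P ≤ k
    · rw [pv_find?_pyRange_some (pvCondA w) 1 (k + 1) P hP1' (by omega)
        (by rw [← hPcast]; exact (pvCondA_iff w P.toNat (by omega) hPn).mpr hPpre)
        ?_]
      · have hwne : w ≠ [] := by intro h; exact hn (by simp [h])
        simp [List.length_eq_zero_iff, hwne, ← hP, hpk]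
      · intro j hj1 hj2
        have hj0 : ((j.toNat : Nat) : Int) = j := Int.toNat_of_nonneg (by omega)
        rw [← hj0]
        rw [Bool.eq_false_iff, ne_eq, pvCondA_iff w j.toNat (by omega) (by omega)]
        exact hPmin j.toNat (by omega) (by omega)
    · rw [pv_find?_pyRange_none (pvCondA w) 1 (k + 1) ?_]
      · have hwne : w ≠ [] := by intro h; exact hn (by simp [h])
        simp [List.length_eq_zero_iff, hwne, ← hP, hpk]
      · intro j hj1 hj2
        have hj0 : ((j.toNat : Nat) : Int) = j := Int.toNat_of_nonneg (by omega)
        rw [← hj0]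
        rw [Bool.eq_false_iff, ne_eq, pvCondA_iff w j.toNat (by omega) (by omega)]
        exact hPmin j.toNat (by omega) (by omega)
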